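-- pv_equiv track=rewrite | github.com/dzynin/mEx_medical_information_extraction | DataPrep/TokenizeRcalcOffsetBratData/tokenize_sent_split_recalc_offset_relationSameSent.py | text_sentence_offsets
-- ===== SOURCE A (Python) =====
-- def text_sentence_offsets(text):
--     sent_offs = []
--     sentences_array = text.split("\n")[0:-1] if not text.split("\n")[-1] else text.split("\n")
--     sentences_array = list(map(lambda x: x.strip(), sentences_array))
--
--     index = -1
--     for i in range(len(sentences_array)):
--         if i == 0:
--             sent_offs.append((0, len(sentences_array[i])))
--             index = len(sentences_array[i])
--         else:
--             sent_offs.append((index + 1, index + 1 + len(sentences_array[i])))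
--             index = index + 1 + len(sentences_array[i])
--
--     return sent_offs
-- ===== SOURCE B (Python) =====
-- def text_sentence_offsets(text):
--     lines = text.split("\n")
--     if not lines[-1]:
--         lines = lines[:-1]
--     if not lines:
--         return []
--     joined = "\n".join(s.strip() for s in lines)
--     spans = []
--     start = 0
--     for pos, ch in enumerate(joined):
--         if ch == "\n":
--             spans.append((start, pos))
--             start = pos + 1
--     spans.append((start, len(joined)))
--     return spans
-- ===== Notes on version B (the rewrite author's own statement) =====
-- stated objective: alternative
-- what changed: Instead of summing stripped-line lengths with a running index and an i==0 special case, B materialises the joined text '\n'.join(stripped lines) and derives the spans by a character scan that closes a span at every separator position found by enumerate.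
import Mathlib
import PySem

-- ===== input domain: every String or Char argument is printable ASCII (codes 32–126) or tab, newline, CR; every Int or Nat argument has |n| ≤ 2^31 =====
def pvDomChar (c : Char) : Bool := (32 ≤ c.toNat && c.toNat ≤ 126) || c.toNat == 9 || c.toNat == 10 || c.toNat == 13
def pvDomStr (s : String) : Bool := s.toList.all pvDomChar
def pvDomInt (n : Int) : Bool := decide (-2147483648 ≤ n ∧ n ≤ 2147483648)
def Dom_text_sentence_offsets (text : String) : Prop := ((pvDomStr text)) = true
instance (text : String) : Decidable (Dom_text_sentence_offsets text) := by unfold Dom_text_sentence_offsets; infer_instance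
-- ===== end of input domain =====

-- B derives the spans by scanning the characters of the joined text "\n".join(stripped lines)
-- for separator positions, instead of A's running index over sentence lengths (objective: alternative, same O(n)).

-- ===== PORT A =====
-- A's loop over range(len(sentences_array)) with state (sent_offs, index).
-- sentences_array[i] is ported as pyGetD (the index is always in range: i < len).
def text_sentence_offsets (text : String) : List (Int × Int) :=
  -- s.split(sep) with sep ≠ "" is PySem.Str.split?, always some; the .getD [] default is never taken
  let parts := (PySem.Str.split? text "\n").getD []
  -- text.split("\n")[-1]: split never returns an empty list, so [-1] never raises; pyGetD "" is exact here
  let sentences_array :=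
    if PySem.List.pyGetD parts (-1) "" = "" then PySem.List.slice parts none (some (-1)) else parts
  let sentences_array := sentences_array.map PySem.Str.strip
  (((PySem.List.pyRange 0 (PySem.List.len sentences_array) 1).foldl
    (fun (st : List (Int × Int) × Int) i =>
      if i = 0 then
        (st.1 ++ [((0 : Int), PySem.Str.len (PySem.List.pyGetD sentences_array i ""))],
         PySem.Str.len (PySem.List.pyGetD sentences_array i ""))
      else
        (st.1 ++ [(st.2 + 1, st.2 + 1 + PySem.Str.len (PySem.List.pyGetD sentences_array i ""))],
         st.2 + 1 + PySem.Str.len (PySem.List.pyGetD sentences_array i "")))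
    ([], -1)).1)

-- ===== PORT B =====
-- Source B: split / drop empty last line / early [] return; joined = "\n".join(stripped lines);
-- then a character scan: `for pos, ch in enumerate(joined)` closing a span at every '\n',
-- plus the final span up to len(joined).
def text_sentence_offsets_alt (text : String) : List (Int × Int) :=
  -- s.split(sep) with sep ≠ "" is PySem.Str.split?, always some; the .getD [] default is never taken
  let lines := (PySem.Str.split? text "\n").getD []
  let lines :=
    if PySem.List.pyGetD lines (-1) "" = "" then PySem.List.slice lines none (some (-1)) else lines
  if lines = [] then []
  else
    let joined := PySem.Str.join "\n" (lines.map PySem.Str.strip)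
    let st := (PySem.List.enumerate joined.toList).foldl
      (fun (st : List (Int × Int) × Int) pc =>
        if pc.2 = '\n' then (st.1 ++ [(st.2, pc.1)], pc.1 + 1) else st)
      ([], 0)
    st.1 ++ [(st.2, PySem.Str.len joined)]

-- ===== PRECONDITION & SPEC =====
def Spec_text_sentence_offsets (text : String) (out : List (Int × Int)) : Prop := out = text_sentence_offsets_alt text
instance (text : String) (out : List (Int × Int)) : Decidable (Spec_text_sentence_offsets text out) := by unfold Spec_text_sentence_offsets; infer_instance

-- ===== CLAIM (what is proved, stated in full; the proofs are below) =====
def Claim_equal_text_sentence_offsets : Prop := ∀ (text : String), Dom_text_sentence_offsets text → Spec_text_sentence_offsets text (text_sentence_offsets text)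

-- ===== LEMMAS AND PROOFS =====

-- reference spec: spans of a sentence list starting at position x
def pvSpansFrom (x : Int) : List String → List (Int × Int)
  | [] => []
  | s :: t => (x, x + PySem.Str.len s) :: pvSpansFrom (x + PySem.Str.len s + 1) t

-- same spec on the char-list side
def pvSpansFromL (x : Int) : List (List Char) → List (Int × Int)
  | [] => []
  | c :: t => (x, x + (c.length : Int)) :: pvSpansFromL (x + c.length + 1) t

theorem pvSpansFrom_toList (ss : List String) : ∀ (x : Int),
    pvSpansFrom x ss = pvSpansFromL x (ss.map String.toList) := by
  induction ss with
  | nil => intro x; simp [pvSpansFrom, pvSpansFromL]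
  | cons s t ih => intro x; simp [pvSpansFrom, pvSpansFromL, PySem.Str.len_eq, ih]

-- A's uniform loop body (the else-branch)
def pvBodyA (st : List (Int × Int) × Int) (s : String) : List (Int × Int) × Int :=
  (st.1 ++ [(st.2 + 1, st.2 + 1 + PySem.Str.len s)], st.2 + 1 + PySem.Str.len s)

theorem pvFoldA (t : List String) : ∀ (acc : List (Int × Int)) (idx : Int),
    (t.foldl pvBodyA (acc, idx)).1 = acc ++ pvSpansFrom (idx + 1) t := by
  induction t with
  | nil => intro acc idx; simp [pvSpansFrom]
  | cons s t ih =>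
    intro acc idx
    simp only [List.foldl_cons, pvBodyA, pvSpansFrom, ih, List.append_assoc, List.singleton_append]

-- A's whole loop equals pvSpansFrom 0
theorem pvLoopA_eq (ss : List String) :
    ((PySem.List.pyRange 0 (PySem.List.len ss) 1).foldl
      (fun (st : List (Int × Int) × Int) i =>
        if i = 0 then
          (st.1 ++ [((0 : Int), PySem.Str.len (PySem.List.pyGetD ss i ""))],
           PySem.Str.len (PySem.List.pyGetD ss i ""))
        else
          (st.1 ++ [(st.2 + 1, st.2 + 1 + PySem.Str.len (PySem.List.pyGetD ss i ""))],
           st.2 + 1 + PySem.Str.len (PySem.List.pyGetD ss i "")))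
      ([], -1)).1 = pvSpansFrom 0 ss := by
  have hcongr : ∀ (l : List Int), (∀ i ∈ l, i ≠ (0 : Int)) → ∀ init,
      (l.foldl (fun (st : List (Int × Int) × Int) i =>
        if i = 0 then
          (st.1 ++ [((0 : Int), PySem.Str.len (PySem.List.pyGetD ss i ""))],
           PySem.Str.len (PySem.List.pyGetD ss i ""))
        else
          (st.1 ++ [(st.2 + 1, st.2 + 1 + PySem.Str.len (PySem.List.pyGetD ss i ""))],
           st.2 + 1 + PySem.Str.len (PySem.List.pyGetD ss i ""))) init)
      = (l.foldl (fun st i => pvBodyA st (PySem.List.pyGetD ss i "")) init) := by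
    intro l hl init
    apply PySem.List.foldl_congr_mem
    intro acc i hi
    simp [if_neg (hl i hi), pvBodyA]
  cases ss with
  | nil =>
    rw [PySem.List.pyRange_one_eq_nil (by simp [PySem.List.len])]
    simp [pvSpansFrom]
  | cons s t =>
    have hlen : (0 : Int) < PySem.List.len (s :: t) := by simp [PySem.List.len]
    rw [PySem.List.pyRange_one_cons hlen, List.foldl_cons, if_pos rfl]
    rw [hcongr _ (fun i hi => by
      have := (PySem.List.mem_pyRange_one.mp hi).1; omega)]
    rw [zero_add]
    rw [PySem.List.foldl_pyRange_pyGetD (s :: t) "" pvBodyA _ (by norm_num : (0:Int) ≤ 1)]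
    have h0 : PySem.List.pyGetD (s :: t) 0 "" = s := by
      simp [PySem.List.pyGetD]
    rw [h0]
    simp only [Int.toNat_one, List.drop_one, List.tail_cons]
    rw [pvFoldA]
    simp [pvSpansFrom]

-- B's scan body
def pvBodyB (st : List (Int × Int) × Int) (pc : Int × Char) : List (Int × Int) × Int :=
  if pc.2 = '\n' then (st.1 ++ [(st.2, pc.1)], pc.1 + 1) else st

-- what B's scan accumulates over "\n".join (c :: cs): the spans of all but the last
-- sentence, and the start position of the last one
def pvScan (k : Int) (c : List Char) : List (List Char) → List (Int × Int) × Int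
  | [] => ([], k)
  | d :: ds =>
      ((k, k + (c.length : Int)) :: (pvScan (k + c.length + 1) d ds).1,
       (pvScan (k + c.length + 1) d ds).2)

-- scanning a separator-free block leaves the state unchanged
theorem pvScanSkip (c : List Char) (h : '\n' ∉ c) : ∀ (k : Int) (st : List (Int × Int) × Int),
    (PySem.List.enumerate c k).foldl pvBodyB st = st := by
  induction c with
  | nil => intro k st; simp [PySem.List.enumerate_nil]
  | cons a t ih =>
    intro k st
    have ha : a ≠ '\n' := fun e => h (by simp [e])
    rw [PySem.List.enumerate_cons, List.foldl_cons]
    have : pvBodyB st (k, a) = st := by simp [pvBodyB, ha]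
    rw [this, ih (fun hm => h (List.mem_cons_of_mem _ hm))]

-- B's scan over the whole joined text
theorem pvFoldJoin (cs : List (List Char)) : ∀ (c : List Char), '\n' ∉ c → (∀ d ∈ cs, '\n' ∉ d) →
    ∀ (acc : List (Int × Int)) (k : Int),
    (PySem.List.enumerate (PySem.Chars.join ['\n'] (c :: cs)) k).foldl pvBodyB (acc, k)
      = (acc ++ (pvScan k c cs).1, (pvScan k c cs).2) := by
  induction cs with
  | nil =>
    intro c hc _ acc k
    rw [PySem.Chars.join_singleton, pvScanSkip c hc]
    simp [pvScan]
  | cons d ds ih =>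
    intro c hc hds acc k
    rw [PySem.Chars.join_cons_cons, List.append_assoc, PySem.List.enumerate_append,
        List.foldl_append, pvScanSkip c hc, List.singleton_append,
        PySem.List.enumerate_cons, List.foldl_cons]
    have hb : pvBodyB (acc, k) (k + (c.length : Int), '\n')
        = (acc ++ [(k, k + (c.length : Int))], k + (c.length : Int) + 1) := by
      simp [pvBodyB]
    rw [hb, ih d (hds d (by simp)) (fun e he => hds e (by simp [he]))]
    simp [pvScan, List.append_assoc]

-- the accumulated spans plus the final span equal the reference spans
theorem pvScan_spans (cs : List (List Char)) : ∀ (c : List Char) (k : Int),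
    (pvScan k c cs).1
      ++ [((pvScan k c cs).2, k + ((PySem.Chars.join ['\n'] (c :: cs)).length : Int))]
      = pvSpansFromL k (c :: cs) := by
  induction cs with
  | nil =>
    intro c k
    rw [PySem.Chars.join_singleton]
    simp [pvScan, pvSpansFromL]
  | cons d ds ih =>
    intro c k
    rw [PySem.Chars.join_cons_cons]
    simp only [pvScan, List.cons_append, List.length_append, List.length_cons,
      List.length_nil]
    rw [show pvSpansFromL k (c :: d :: ds)
        = (k, k + (c.length : Int)) :: pvSpansFromL (k + c.length + 1) (d :: ds) from rfl]
    rw [← ih d (k + (c.length : Int) + 1)]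
    push_cast
    ring_nf

theorem pvScan_spans0 (cs : List (List Char)) (c : List Char) :
    (pvScan 0 c cs).1
      ++ [((pvScan 0 c cs).2, ((PySem.Chars.join ['\n'] (c :: cs)).length : Int))]
      = pvSpansFromL 0 (c :: cs) := by
  have h := pvScan_spans cs c 0
  rwa [zero_add] at h

-- parts of text.split("\n") contain no '\n'
theorem pvGoNoNl : ∀ (fuel : Nat) (l cur : List Char) (acc : List (List Char)),
    l.length ≤ fuel → '\n' ∉ cur → (∀ q ∈ acc, '\n' ∉ q) →
    ∀ p ∈ PySem.Chars.splitOn.go ['\n'] fuel l cur acc, '\n' ∉ p := by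
  intro fuel
  induction fuel with
  | zero =>
    intro l cur acc hl hcur hacc p hp
    have hnil : l = [] := by cases l with | nil => rfl | cons a t => simp at hl
    subst hnil
    rw [show PySem.Chars.splitOn.go ['\n'] 0 [] cur acc
        = ((cur.reverse ++ []) :: acc).reverse from rfl, List.mem_reverse] at hp
    rcases List.mem_cons.mp hp with h1 | h1
    · subst h1; simp [hcur]
    · exact hacc p h1
  | succ n ih =>
    intro l cur acc hl hcur hacc p hp
    cases l with
    | nil =>
      rw [show PySem.Chars.splitOn.go ['\n'] (n+1) [] cur acc
          = (cur.reverse :: acc).reverse from rfl, List.mem_reverse] at hp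
      rcases List.mem_cons.mp hp with h1 | h1
      · subst h1; simp [hcur]
      · exact hacc p h1
    | cons ch rest =>
      rw [show PySem.Chars.splitOn.go ['\n'] (n+1) (ch :: rest) cur acc
          = if ['\n'].isPrefixOf (ch :: rest)
            then PySem.Chars.splitOn.go ['\n'] n rest [] (cur.reverse :: acc)
            else PySem.Chars.splitOn.go ['\n'] n rest (ch :: cur) acc from rfl] at hp
      have hlr : rest.length ≤ n := by simpa using hl
      by_cases hch : ch = '\n'
      · rw [if_pos (by simp [List.isPrefixOf, hch])] at hp
        refine ih rest [] (cur.reverse :: acc) hlr (by simp) ?_ p hp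
        intro q hq
        rcases List.mem_cons.mp hq with h1 | h1
        · subst h1; simp [hcur]
        · exact hacc q h1
      · rw [if_neg (by simp [List.isPrefixOf]; exact fun e => hch e.symm)] at hp
        exact ih rest (ch :: cur) acc hlr
          (by simp [List.mem_cons, hcur, Ne.symm hch]) hacc p hp

theorem pvSplitNoNl (s : List Char) : ∀ p ∈ PySem.Chars.splitOn s ['\n'], '\n' ∉ p :=
  pvGoNoNl (s.length + 1) s [] [] (Nat.le_succ _) (by simp) (by simp)

theorem pvStripNoNl {s : List Char} (h : '\n' ∉ s) : '\n' ∉ PySem.Chars.strip s := by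
  intro hm
  unfold PySem.Chars.strip PySem.Chars.rstrip PySem.Chars.lstrip at hm
  rw [List.mem_reverse] at hm
  have h1 := (List.dropWhile_sublist _).subset hm
  rw [List.mem_reverse] at h1
  exact h ((List.dropWhile_sublist _).subset h1)

-- ===== VERDICT (by name: the statement is the Claim_ definition above) =====
theorem text_sentence_offsets_spec : Claim_equal_text_sentence_offsets := by
  intro text _
  unfold Spec_text_sentence_offsets text_sentence_offsets text_sentence_offsets_alt
  obtain ⟨L, hL, hLmap⟩ : ∃ L : List String, PySem.Str.split? text "\n" = some L ∧
      L.map String.toList = PySem.Chars.splitOn text.toList ['\n'] := by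
    have h := PySem.Str.split?_map text "\n"
    rw [show ("\n" : String).toList = ['\n'] from rfl,
        show PySem.Chars.split? text.toList ['\n']
          = some (PySem.Chars.splitOn text.toList ['\n']) from rfl] at h
    cases hcase : PySem.Str.split? text "\n" with
    | none => rw [hcase] at h; simp at h
    | some L => rw [hcase] at h; exact ⟨L, rfl, by simpa using h⟩
  have hnoL : ∀ p ∈ L, '\n' ∉ p.toList := by
    intro p hp
    apply pvSplitNoNl text.toList
    rw [← hLmap]
    exact List.mem_map.mpr ⟨p, hp, rfl⟩
  rw [hL]
  simp only [Option.getD_some]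
  generalize hG : (if PySem.List.pyGetD L (-1) "" = ""
      then PySem.List.slice L none (some (-1)) else L) = L'
  have hnoL' : ∀ p ∈ L', '\n' ∉ p.toList := by
    intro p hp
    apply hnoL
    rw [← hG] at hp
    split at hp
    · rw [show PySem.List.slice L none (some (-1)) = L.dropLast from by simp [pysem]] at hp
      exact (List.dropLast_sublist _).subset hp
    · exact hp
  rw [pvLoopA_eq]
  cases L' with
  | nil => simp [pvSpansFrom]
  | cons l t =>
    rw [if_neg (by simp)]
    have hmapss : ((l :: t).map PySem.Str.strip).map String.toList
        = (PySem.Chars.strip l.toList) :: t.map (fun s => PySem.Chars.strip s.toList) := by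
      simp [List.map_map, Function.comp]
    have hjoin : (PySem.Str.join "\n" ((l :: t).map PySem.Str.strip)).toList
        = PySem.Chars.join ['\n']
            ((PySem.Chars.strip l.toList) :: t.map (fun s => PySem.Chars.strip s.toList)) := by
      rw [PySem.Str.toList_join, show ("\n" : String).toList = ['\n'] from rfl, hmapss]
    have hnoc : '\n' ∉ PySem.Chars.strip l.toList :=
      pvStripNoNl (hnoL' l (by simp))
    have hnocs : ∀ d ∈ t.map (fun s => PySem.Chars.strip s.toList), '\n' ∉ d := by
      intro d hd
      obtain ⟨q, hq, rfl⟩ := List.mem_map.mp hd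
      exact pvStripNoNl (hnoL' q (by simp [hq]))
    rw [hjoin]
    rw [show (fun (st : List (Int × Int) × Int) (pc : Int × Char) =>
          if pc.2 = '\n' then (st.1 ++ [(st.2, pc.1)], pc.1 + 1) else st) = pvBodyB from rfl]
    rw [pvFoldJoin _ _ hnoc hnocs]
    simp only [List.nil_append]
    rw [PySem.Str.len_eq, hjoin, pvScan_spans0]
    rw [pvSpansFrom_toList, hmapss]
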